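-- pv_equiv track=rewrite | github.com/mauludsadiq/LLM_Nature_Indention_Compensation | src/llm_nature_indention_compensation/indent_controller.py | infer_indent_delta_from_text
-- ===== SOURCE A (Python) =====
-- from typing import Dict, List, Optional, Sequence, Tuple
--
-- def leading_spaces(line: str) -> int:
--     return len(line) - len(line.lstrip(" "))
--
-- def infer_indent_delta_from_text(text: str, default: int = 4) -> int:
--     deltas: List[int] = []
--     prev = 0
--     for raw in text.splitlines():
--         if not raw.strip():
--             continue
--         ind = leading_spaces(raw)
--         if ind > prev:
--             deltas.append(ind - prev)
--         prev = ind
--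
--     if not deltas:
--         return default
--
--     counts: Dict[int, int] = {}
--     for d in deltas:
--         counts[d] = counts.get(d, 0) + 1
--     # mode; tie -> smallest
--     return sorted(counts.items(), key=lambda kv: (-kv[1], kv[0]))[0][0]
-- ===== SOURCE B (Python) =====
-- def leading_spaces(line: str) -> int:
--     return len(line) - len(line.lstrip(" "))
--
-- def infer_indent_delta_from_text(text: str, default: int = 4) -> int:
--     deltas = []
--     prev = 0
--     for raw in text.splitlines():
--         if not raw.strip():
--             continue
--         ind = leading_spaces(raw)
--         if ind > prev:
--             deltas.append(ind - prev)
--         prev = ind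
--
--     if not deltas:
--         return default
--
--     # No counting structure at all: sort the deltas ascending, then scan once,
--     # tracking run lengths of consecutive equal values.  The best run is updated
--     # only on a strictly longer run, so the smallest value wins any tie.
--     deltas.sort()
--     best = deltas[0]
--     best_len = 1
--     cur = deltas[0]
--     cur_len = 1
--     for d in deltas[1:]:
--         if d == cur:
--             cur_len += 1
--         else:
--             cur = d
--             cur_len = 1
--         if cur_len > best_len:
--             best = cur
--             best_len = cur_len
--     return best
-- ===== Notes on version B (the rewrite author's own statement) =====
-- stated objective: alternative
-- what changed: A's count dictionary and the sort of its items by (-count, key) are gone entirely: B sorts the delta list itself ascending and does one linear run-length scan over it, keeping best/best_len and replacing them only on a strictly longer run, so the smallest delta wins ties without any frequency table.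
import Mathlib
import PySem

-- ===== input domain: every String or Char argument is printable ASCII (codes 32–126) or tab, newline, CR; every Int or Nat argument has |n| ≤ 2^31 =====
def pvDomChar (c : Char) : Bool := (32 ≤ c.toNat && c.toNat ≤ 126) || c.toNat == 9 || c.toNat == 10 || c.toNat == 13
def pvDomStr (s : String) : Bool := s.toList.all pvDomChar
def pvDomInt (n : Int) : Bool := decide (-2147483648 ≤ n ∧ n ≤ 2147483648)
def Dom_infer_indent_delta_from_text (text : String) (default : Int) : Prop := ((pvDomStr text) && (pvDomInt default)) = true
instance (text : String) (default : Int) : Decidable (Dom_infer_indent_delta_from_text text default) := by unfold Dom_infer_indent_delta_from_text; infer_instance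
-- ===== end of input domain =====

-- B drops A's count dictionary and the sort of its items by (-count, key) entirely:
-- it sorts the delta list itself and does one run-length scan (strict '>' keeps the
-- smallest delta on ties); same results (objective: alternative, no speed claim).
-- B sorts its local deltas list in place; 'text' and 'default' are untouched by both.

-- ===== PORT A =====
-- line.lstrip(" "): drop leading SPACE characters only (hand port, exact: no PySem chars-argument lstrip)
def pvLstripSpaces (s : String) : String := String.ofList (s.toList.dropWhile (fun c => c == ' '))

-- leading_spaces(line) = len(line) - len(line.lstrip(" "))  (shared helper of both Python files)
def pvLeadingSpaces (line : String) : Int := PySem.Str.len line - PySem.Str.len (pvLstripSpaces line)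

-- the deltas-collecting loop, literally as in both A and B (identical source text in both)
def pvDeltas (text : String) : List Int :=
  ((PySem.Str.splitlines text).foldl
    (fun (st : List Int × Int) raw =>
      if PySem.Str.strip raw = "" then st
      else
        let ind := pvLeadingSpaces raw
        (if ind > st.2 then st.1 ++ [ind - st.2] else st.1, ind))
    ([], 0)).1

def infer_indent_delta_from_text (text : String) (default : Int) : Int :=
  let deltas := pvDeltas text
  if deltas = [] then default
  else
    let counts := deltas.foldl (fun (d : PySem.Dict Int Int) x => d.insert x (d.getD x 0 + 1)) PySem.Dict.empty
    -- sorted(counts.items(), key=lambda kv: (-kv[1], kv[0]))[0][0]; [0] never raises: counts ≠ empty here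
    ((PySem.List.sorted2 counts.items (fun kv => -kv.2) (fun kv => kv.1)).headD (0, 0)).1

-- ===== PORT B =====
-- one iteration of B's run-length scan; state = (best, best_len, cur, cur_len)
def pvRunStep (s : Int × Int × Int × Int) (d : Int) : Int × Int × Int × Int :=
  let cur := if d = s.2.2.1 then s.2.2.1 else d
  let clen := if d = s.2.2.1 then s.2.2.2 + 1 else 1
  if clen > s.2.1 then (cur, clen, cur, clen) else (s.1, s.2.1, cur, clen)

def infer_indent_delta_from_text_alt (text : String) (default : Int) : Int :=
  let deltas := pvDeltas text
  if deltas = [] then default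
  else
    let sds := PySem.List.sorted deltas (fun x => x)   -- deltas.sort()
    -- best = deltas[0]; …; for d in deltas[1:]: …  (sds ≠ [] here, so [0] is headD, [1:] the tail)
    (sds.tail.foldl pvRunStep (sds.headD 0, 1, sds.headD 0, 1)).1

-- ===== PRECONDITION & SPEC =====
def Spec_infer_indent_delta_from_text (text : String) (default : Int) (out : Int) : Prop := out = infer_indent_delta_from_text_alt text default
instance (text : String) (default : Int) (out : Int) : Decidable (Spec_infer_indent_delta_from_text text default out) := by unfold Spec_infer_indent_delta_from_text; infer_instance

-- ===== CLAIM (what is proved, stated in full; the proofs are below) =====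
def Claim_equal_infer_indent_delta_from_text : Prop := ∀ (text : String) (default : Int), Dom_infer_indent_delta_from_text text default → Spec_infer_indent_delta_from_text text default (infer_indent_delta_from_text text default)

-- ===== LEMMAS AND PROOFS =====

-- "r is the mode of ds among the candidates L, smallest on ties"
def pvGood (ds L : List Int) (r : Int) : Prop :=
  r ∈ L ∧ ∀ e ∈ L, (List.count e ds : Int) < (List.count r ds : Int) ∨ ((List.count e ds : Int) = (List.count r ds : Int) ∧ r ≤ e)

theorem pv_good_unique (ds L L' : List Int) (r r' : Int)
    (h : pvGood ds L r) (h' : pvGood ds L' r') (hm : ∀ e, e ∈ L ↔ e ∈ L') : r = r' := by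
  obtain ⟨hr, hall⟩ := h
  obtain ⟨hr', hall'⟩ := h'
  have h1 := hall r' ((hm r').2 hr')
  have h2 := hall' r ((hm r).1 hr)
  omega

-- head of an insertBy is decided by one comparison
theorem pv_headOf_insertBy {α : Type} (before : α → α → Bool) (x h : α) (t : List α) :
    ∃ t', PySem.List.insertBy before x (h :: t) = (if before x h then x else h) :: t' := by
  by_cases hb : before x h <;> simp [PySem.List.insertBy, hb]

-- head of an insertion-sort fold is a running "pick the earlier one" fold
theorem pv_headD_foldl_insertBy {α : Type} (before : α → α → Bool) (d : α) :
    ∀ (xs : List α) (h : α) (t : List α),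
      (xs.foldl (fun acc x => PySem.List.insertBy before x acc) (h :: t)).headD d
        = xs.foldl (fun m x => if before x m then x else m) h := by
  intro xs
  induction xs with
  | nil => intro h t; simp
  | cons x xs ih =>
      intro h t
      obtain ⟨t', ht'⟩ := pv_headOf_insertBy before x h t
      simp only [List.foldl_cons, ht', ih]

-- head of a sorted2 over a nonempty list, as a one-pass pick fold
theorem pv_sorted2_headD {α κ₁ κ₂ : Type} [LT κ₁] [DecidableLT κ₁] [LT κ₂] [DecidableLT κ₂]
    (h : α) (t : List α) (k1 : α → κ₁) (k2 : α → κ₂) (d : α) :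
    (PySem.List.sorted2 (h :: t) k1 k2).headD d
      = t.foldl (fun m x =>
          if (decide (k1 x < k1 m) || (!decide (k1 m < k1 x) && decide (k2 x < k2 m))) then x else m) h := by
  show (((h :: t).foldl (fun acc x =>
      PySem.List.insertBy (fun a b => decide (k1 a < k1 b) || (!decide (k1 b < k1 a) && decide (k2 a < k2 b))) x acc) [])).headD d = _
  rw [List.foldl_cons]
  have h1 : PySem.List.insertBy
      (fun a b => decide (k1 a < k1 b) || (!decide (k1 b < k1 a) && decide (k2 a < k2 b))) h [] = [h] := by
    simp [PySem.List.insertBy]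
  rw [h1]
  exact pv_headD_foldl_insertBy _ d t h []

-- first component of the pick fold over the (key, count) pairs = the pick fold over the keys
theorem pv_fold_pairs_fst (ds : List Int) :
    ∀ (T : List Int) (m : Int),
      (List.foldl
          (fun m x => if (decide (-x.2 < -m.2) || (!decide (-m.2 < -x.2) && decide (x.1 < m.1))) then x else m)
          (m, (List.count m ds : Int)) (List.map (fun k => (k, (List.count k ds : Int))) T)).1
        = T.foldl (fun m k =>
            if (decide (-(List.count k ds : Int) < -(List.count m ds : Int)) || (!decide (-(List.count m ds : Int) < -(List.count k ds : Int)) && decide (k < m))) then k else m) m := by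
  intro T
  induction T with
  | nil => intro m; rfl
  | cons x T ih =>
      intro m
      rw [List.map_cons, List.foldl_cons, List.foldl_cons]
      by_cases hc : (decide (-(List.count x ds : Int) < -(List.count m ds : Int)) || (!decide (-(List.count m ds : Int) < -(List.count x ds : Int)) && decide (x < m))) = true
      · dsimp only
        rw [if_pos hc, if_pos hc]
        exact ih x
      · dsimp only
        rw [if_neg hc, if_neg hc]
        exact ih m

-- one step of A's pick: where it lands and that it is lex-minimal among {m, x}
theorem pvPickA_step (ds : List Int) (m x : Int) :
    ((if (decide (-((List.count x ds : Int)) < -((List.count m ds : Int))) || (!decide (-((List.count m ds : Int)) < -((List.count x ds : Int))) && decide (x < m))) then x else m) = x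
      ∨ (if (decide (-((List.count x ds : Int)) < -((List.count m ds : Int))) || (!decide (-((List.count m ds : Int)) < -((List.count x ds : Int))) && decide (x < m))) then x else m) = m)
    ∧ (∀ e ∈ [m, x], (List.count e ds : Int) < (List.count (if (decide (-((List.count x ds : Int)) < -((List.count m ds : Int))) || (!decide (-((List.count m ds : Int)) < -((List.count x ds : Int))) && decide (x < m))) then x else m) ds : Int)
        ∨ ((List.count e ds : Int) = (List.count (if (decide (-((List.count x ds : Int)) < -((List.count m ds : Int))) || (!decide (-((List.count m ds : Int)) < -((List.count x ds : Int))) && decide (x < m))) then x else m) ds : Int)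
            ∧ (if (decide (-((List.count x ds : Int)) < -((List.count m ds : Int))) || (!decide (-((List.count m ds : Int)) < -((List.count x ds : Int))) && decide (x < m))) then x else m) ≤ e)) := by
  by_cases hb : (decide (-((List.count x ds : Int)) < -((List.count m ds : Int))) || (!decide (-((List.count m ds : Int)) < -((List.count x ds : Int))) && decide (x < m))) = true
  · rw [if_pos hb] at *
    simp only [Bool.or_eq_true, Bool.and_eq_true, Bool.not_eq_true', decide_eq_true_eq,
      decide_eq_false_iff_not] at hb
    refine ⟨Or.inl rfl, ?_⟩
    intro e he
    rcases List.mem_pair.1 he with rfl | rfl <;> omega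
  · rw [if_neg hb] at *
    simp only [Bool.or_eq_true, Bool.and_eq_true, Bool.not_eq_true', decide_eq_true_eq,
      decide_eq_false_iff_not, not_or, not_and, not_lt] at hb
    refine ⟨Or.inr rfl, ?_⟩
    intro e he
    rcases List.mem_pair.1 he with rfl | rfl <;> omega

-- A's pick fold (head of the sorted-by-(-count,key) items) is the tie-smallest mode
theorem pvA_fold_good (ds : List Int) :
    ∀ (T : List Int) (m : Int),
      pvGood ds (m :: T)
        (T.foldl (fun m k =>
          if (decide (-((List.count k ds : Int)) < -((List.count m ds : Int))) || (!decide (-((List.count m ds : Int)) < -((List.count k ds : Int))) && decide (k < m))) then k else m) m) := by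
  intro T
  induction T with
  | nil =>
      intro m
      refine ⟨List.mem_singleton.2 rfl, ?_⟩
      intro e he
      rw [List.mem_singleton] at he
      subst he
      rw [List.foldl_nil]
      omega
  | cons x T ih =>
      intro m
      rw [List.foldl_cons]
      obtain ⟨hmem, hlex⟩ := pvPickA_step ds m x
      obtain ⟨hrmem, hrall⟩ := ih
        (if (decide (-((List.count x ds : Int)) < -((List.count m ds : Int))) || (!decide (-((List.count m ds : Int)) < -((List.count x ds : Int))) && decide (x < m))) then x else m)
      have hrm' := hrall _ List.mem_cons_self
      have hlm := hlex m (List.mem_cons_self)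
      have hlx := hlex x (List.mem_cons_of_mem _ List.mem_cons_self)
      refine ⟨?_, ?_⟩
      · rcases List.mem_cons.1 hrmem with h | h
        · rw [h]
          rcases hmem with h2 | h2 <;> rw [h2]
          · exact List.mem_cons_of_mem _ List.mem_cons_self
          · exact List.mem_cons_self
        · exact List.mem_cons_of_mem _ (List.mem_cons_of_mem _ h)
      · intro e he
        rcases List.mem_cons.1 he with rfl | he
        · omega
        rcases List.mem_cons.1 he with rfl | he
        · omega
        · exact hrall e (List.mem_cons_of_mem _ he)

-- invariant of B's run-length scan over a processed sorted prefix P: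
-- cur is the last (= maximal) value with its exact multiplicity, best the tie-smallest mode of P
def pvRunInv (P : List Int) (s : Int × Int × Int × Int) : Prop :=
  s.2.2.1 ∈ P ∧ (∀ e ∈ P, e ≤ s.2.2.1) ∧ s.2.2.2 = (List.count s.2.2.1 P : Int) ∧
  s.1 ∈ P ∧ s.2.1 = (List.count s.1 P : Int) ∧
  ∀ e ∈ P, (List.count e P : Int) < s.2.1 ∨ ((List.count e P : Int) = s.2.1 ∧ s.1 ≤ e)

theorem pvRunStep_inv (P : List Int) (s : Int × Int × Int × Int) (d : Int)
    (hInv : pvRunInv P s) (hle : ∀ e ∈ P, e ≤ d) : pvRunInv (P ++ [d]) (pvRunStep s d) := by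
  obtain ⟨hcmem, hcmax, hclen, hbmem, hblen, hbest⟩ := hInv
  have hcount : ∀ e, (List.count e (P ++ [d]) : Int)
      = (List.count e P : Int) + (if d = e then 1 else 0) := by
    intro e
    rw [List.count_append]
    by_cases h : d = e <;> simp [h]
  have hmemP : ∀ e, e ∈ P ++ [d] → e = d ∨ e ∈ P := by
    intro e he
    rcases List.mem_append.1 he with h | h
    · exact Or.inr h
    · exact Or.inl (List.mem_singleton.1 h)
  by_cases hd : d = s.2.2.1
  · -- run continues
    have hcd : (List.count d P : Int) = s.2.2.2 := by rw [hd, ← hclen]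
    unfold pvRunStep
    rw [if_pos hd, if_pos hd]
    by_cases hgt : s.2.2.2 + 1 > s.2.1
    · rw [if_pos hgt]
      unfold pvRunInv
      dsimp only
      refine ⟨?_, ?_, ?_, ?_, ?_, ?_⟩
      · exact List.mem_append_left _ hcmem
      · intro e he
        rcases hmemP e he with h | h
        · rw [h, hd]
        · exact hcmax e h
      · rw [hcount, hd]; simp [← hclen]
      · exact List.mem_append_left _ hcmem
      · rw [hcount, hd]; simp [← hclen]
      · intro e he
        rw [hcount]
        by_cases hed : d = e
        · subst hed
          rw [if_pos rfl]
          omega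
        · have heP : e ∈ P := by
            rcases hmemP e he with h | h
            · exact absurd h.symm hed
            · exact h
          have h1 := hbest e heP
          have h2 := hcmax e heP
          rw [if_neg hed]
          omega
    · rw [if_neg hgt]
      have hbd : s.1 ≠ d := by
        intro h
        rw [← h] at hcd
        rw [← hblen] at hcd
        omega
      unfold pvRunInv
      dsimp only
      refine ⟨?_, ?_, ?_, ?_, ?_, ?_⟩
      · exact List.mem_append_left _ hcmem
      · intro e he
        rcases hmemP e he with h | h
        · rw [h, hd]
        · exact hcmax e h
      · rw [hcount, hd]; simp [← hclen]
      · exact List.mem_append_left _ hbmem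
      · rw [hcount]; simp [Ne.symm hbd, hblen]
      · intro e he
        rw [hcount]
        by_cases hed : d = e
        · rw [if_pos hed, ← hed, hcd]
          rcases (by omega : s.2.2.2 + 1 < s.2.1 ∨ s.2.2.2 + 1 = s.2.1) with h | h
          · exact Or.inl h
          · refine Or.inr ⟨h, ?_⟩
            rw [hd]
            exact hcmax s.1 hbmem
        · have heP : e ∈ P := by
            rcases hmemP e he with h | h
            · exact absurd h.symm hed
            · exact h
          have := hbest e heP
          simp only [if_neg hed]
          omega
  · -- new, strictly larger run value
    have hcled : s.2.2.1 ≤ d := hle _ hcmem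
    have hdgt : ∀ e ∈ P, e < d := by
      intro e he
      have h1 := hcmax e he
      omega
    have hdP : d ∉ P := fun h => lt_irrefl d (hdgt d h)
    have hcountd : (List.count d P : Int) = 0 := by
      simp [List.count_eq_zero_of_not_mem hdP]
    have hblen1 : 1 ≤ s.2.1 := by
      have : 0 < List.count s.1 P := List.count_pos_iff.2 hbmem
      omega
    have hbd : s.1 ≠ d := fun h => hdP (h ▸ hbmem)
    unfold pvRunStep
    rw [if_neg hd, if_neg hd, if_neg (by omega : ¬ (1 : Int) > s.2.1)]
    unfold pvRunInv
    dsimp only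
    refine ⟨?_, ?_, ?_, ?_, ?_, ?_⟩
    · exact List.mem_append_right _ List.mem_cons_self
    · intro e he
      rcases hmemP e he with h | h
      · rw [h]
      · exact le_of_lt (hdgt e h)
    · rw [hcount]; simp [hcountd]
    · exact List.mem_append_left _ hbmem
    · rw [hcount]; simp [Ne.symm hbd, hblen]
    · intro e he
      rw [hcount]
      by_cases hed : d = e
      · rw [if_pos hed, ← hed, hcountd]
        rcases (by omega : (0 : Int) + 1 < s.2.1 ∨ (0 : Int) + 1 = s.2.1) with h | h
        · exact Or.inl h
        · exact Or.inr ⟨h, le_of_lt (hdgt s.1 hbmem)⟩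
      · have heP : e ∈ P := by
          rcases hmemP e he with h | h
          · exact absurd h.symm hed
          · exact h
        have := hbest e heP
        simp only [if_neg hed]
        omega

theorem pvB_fold_inv :
    ∀ (rest P : List Int) (s : Int × Int × Int × Int),
      pvRunInv P s → (∀ e ∈ P, ∀ d ∈ rest, e ≤ d) → rest.Pairwise (· ≤ ·) →
      pvRunInv (P ++ rest) (rest.foldl pvRunStep s) := by
  intro rest
  induction rest with
  | nil => intro P s hInv _ _; simpa using hInv
  | cons d rest ih =>
      intro P s hInv hle hpw
      rw [List.foldl_cons]
      have hstep := pvRunStep_inv P s d hInv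
        (fun e he => hle e he d List.mem_cons_self)
      have hgoal := ih (P ++ [d]) (pvRunStep s d) hstep ?_ (List.pairwise_cons.1 hpw).2
      · simpa using hgoal
      · intro e he d' hd'
        rcases List.mem_append.1 he with h | h
        · exact hle e h d' (List.mem_cons_of_mem _ hd')
        · rw [List.mem_singleton.1 h]
          exact (List.pairwise_cons.1 hpw).1 d' hd'

-- ===== VERDICT (by name: the statement is the Claim_ definition above) =====
theorem infer_indent_delta_from_text_spec : Claim_equal_infer_indent_delta_from_text := by
  intro text default _
  unfold Spec_infer_indent_delta_from_text infer_indent_delta_from_text infer_indent_delta_from_text_alt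
  by_cases h0 : pvDeltas text = []
  · simp [h0]
  · simp only [h0, if_false]
    set ds := pvDeltas text with hds
    have hd0S : ∃ x, x ∈ PySem.Set.ofList ds := by
      cases hc : ds with
      | nil => exact absurd hc h0
      | cons a l => exact ⟨a, (PySem.Set.mem_ofList _ a).2 List.mem_cons_self⟩
    obtain ⟨s0, S', hS⟩ : ∃ s0 S', PySem.Set.ofList ds = s0 :: S' := by
      cases hc : PySem.Set.ofList ds with
      | nil => obtain ⟨x, hx⟩ := hd0S; rw [hc] at hx; cases hx
      | cons a l => exact ⟨a, l, rfl⟩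
    -- A side
    rw [PySem.Dict.foldl_insert_getD_add_one_eq_counter, PySem.Dict.items_counter, hS, List.map_cons,
      pv_sorted2_headD, pv_fold_pairs_fst]
    have hgA := pvA_fold_good ds S' s0
    -- B side: the sorted deltas and the run-length scan
    obtain ⟨b0, B', hsds⟩ : ∃ b0 B', PySem.List.sorted ds (fun x => x) = b0 :: B' := by
      cases hc : PySem.List.sorted ds (fun x => x) with
      | nil => exact absurd ((PySem.List.sorted_eq_nil_iff _ _ _).1 hc) h0
      | cons a l => exact ⟨a, l, rfl⟩
    rw [hsds, List.tail_cons, List.headD_cons]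
    have hpw : (b0 :: B').Pairwise (· ≤ ·) := by
      have := PySem.List.sorted_pairwise ds (fun x => x)
      rwa [hsds] at this
    have hInv0 : pvRunInv [b0] (b0, 1, b0, 1) := by
      refine ⟨List.mem_singleton.2 rfl, ?_, ?_, List.mem_singleton.2 rfl, ?_, ?_⟩
      · intro e he; rw [List.mem_singleton.1 he]
      · simp
      · simp
      · intro e he; rw [List.mem_singleton.1 he]; simp
    have hInv := pvB_fold_inv B' [b0] (b0, 1, b0, 1) hInv0
      (fun e he d hd => by
        rw [List.mem_singleton.1 he]
        exact (List.pairwise_cons.1 hpw).1 d hd)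
      (List.pairwise_cons.1 hpw).2
    obtain ⟨_, _, _, hbmem, hblen, hbest⟩ := hInv
    simp only [List.singleton_append] at hbmem hblen hbest
    -- counts over the sorted list are counts over ds
    have hperm : (PySem.List.sorted ds (fun x => x)).Perm ds := PySem.List.sorted_perm ds _ _
    have hcnt : ∀ e, List.count e (b0 :: B' : List Int) = List.count e ds := by
      intro e
      rw [← hsds]
      exact hperm.count_eq e
    have hgB : pvGood ds (b0 :: B')
        ((B'.foldl pvRunStep (b0, 1, b0, 1)).1) := by
      refine ⟨by simpa using hbmem, ?_⟩
      intro e he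
      have := hbest e (by simpa using he)
      rw [hcnt e] at this
      rw [hcnt _] at hblen
      omega
    have hmm : ∀ e, e ∈ (s0 :: S' : List Int) ↔ e ∈ (b0 :: B' : List Int) := by
      intro e
      rw [← hS, ← hsds, PySem.Set.mem_ofList, PySem.List.mem_sorted]
    exact pv_good_unique ds (s0 :: S') (b0 :: B') _ _ hgA hgB hmm
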